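-- pv_equiv track=rewrite | github.com/walidsi/python | algorithms/daily_byte.py | get_uncommon_words
-- ===== SOURCE A (Python) =====
-- from typing import List
--
-- def get_uncommon_words(s: str, t: str) -> List[str]:
--     """Given two strings representing sentences, return the words that are not common to both strings
--     (i.e. the words that only appear in one of the sentences). You may assume that each sentence
--     is a sequence of words (without punctuation) correctly separated using space characters.
--     """
--
--     s_words = {}
--
--     for word in s.split(' '):
--         s_words[word] = True
--
--     t_words = {}
--     for word in t.split(' '):
--         t_words[word] = True
--
--
--     uncommon_words = []
--     for word in s_words.keys():
--         if word not in t_words: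
--             uncommon_words.append(word)
--
--     for word in t_words.keys():
--         if word not in s_words:
--             uncommon_words.append(word)
--
--     return uncommon_words
-- ===== SOURCE B (Python) =====
-- def get_uncommon_words(s: str, t: str):
--     # Mark each word with a bitmask of the sentences it occurs in (1 = s, 2 = t),
--     # then keep (in insertion order) the words whose mask is not 3.
--     mark = {}
--     for w in s.split(' '):
--         mark[w] = 1
--     for w in t.split(' '):
--         mark[w] = mark.get(w, 0) | 2
--     return [w for w, m in mark.items() if m != 3]
-- ===== Notes on version B (the rewrite author's own statement) =====
-- stated objective: alternative
-- what changed: Instead of building two word sets and running two asymmetric membership-scan loops, B builds a single dict tagging each word with a bitmask of the sentences it occurs in and emits the words whose mask is not 3 in one filter pass, with no cross-set membership tests at all.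
import Mathlib
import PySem

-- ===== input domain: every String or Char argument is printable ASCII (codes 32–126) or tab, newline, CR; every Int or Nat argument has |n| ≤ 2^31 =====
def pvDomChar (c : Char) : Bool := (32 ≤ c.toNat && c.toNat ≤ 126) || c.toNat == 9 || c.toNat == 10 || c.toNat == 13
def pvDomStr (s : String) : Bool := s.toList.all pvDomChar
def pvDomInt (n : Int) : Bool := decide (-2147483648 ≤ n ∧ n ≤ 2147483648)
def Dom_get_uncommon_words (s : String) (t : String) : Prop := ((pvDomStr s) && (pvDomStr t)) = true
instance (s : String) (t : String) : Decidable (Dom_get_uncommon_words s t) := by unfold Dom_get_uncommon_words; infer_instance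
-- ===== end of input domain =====

-- B replaces A's two word sets and two asymmetric membership-scan loops by one dict
-- tagging each word with a bitmask of the sentences containing it, filtered once for mask ≠ 3.


-- shared primitive: Python's s.split(' '); the separator " " is nonempty, so split? never returns none
def pvSplitSpace (s : String) : List String := (PySem.Str.split? s " ").getD []

-- ===== PORT A =====
def get_uncommon_words (s : String) (t : String) : List String :=
  let s_words : PySem.Dict String Bool :=
    (pvSplitSpace s).foldl (fun d word => d.insert word true) PySem.Dict.empty
  let t_words : PySem.Dict String Bool :=
    (pvSplitSpace t).foldl (fun d word => d.insert word true) PySem.Dict.empty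
  let uncommon1 :=
    s_words.keys.foldl (fun acc word => if !(t_words.contains word) then acc ++ [word] else acc) []
  t_words.keys.foldl (fun acc word => if !(s_words.contains word) then acc ++ [word] else acc) uncommon1

-- ===== PORT B =====
def get_uncommon_words_alt (s : String) (t : String) : List String :=
  let mark : PySem.Dict String Int :=
    (pvSplitSpace s).foldl (fun d w => d.insert w 1) PySem.Dict.empty
  let mark2 : PySem.Dict String Int :=
    (pvSplitSpace t).foldl (fun d w => d.insert w (Int.lor (d.getD w 0) 2)) mark
  (mark2.items.filter (fun p => p.2 != 3)).map Prod.fst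

-- ===== PRECONDITION & SPEC =====
def Spec_get_uncommon_words (s : String) (t : String) (out : List String) : Prop := out = get_uncommon_words_alt s t
instance (s : String) (t : String) (out : List String) : Decidable (Spec_get_uncommon_words s t out) := by unfold Spec_get_uncommon_words; infer_instance

-- ===== CLAIM (what is proved, stated in full; the proofs are below) =====
def Claim_equal_get_uncommon_words : Prop := ∀ (s : String) (t : String), Dom_get_uncommon_words s t → Spec_get_uncommon_words s t (get_uncommon_words s t)

-- ===== LEMMAS AND PROOFS =====

-- A's two key loops produce the two asymmetric difference filters
theorem pvASide (a b : List String) :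
    (let s_words := a.foldl (fun d word => d.insert word true) (PySem.Dict.empty : PySem.Dict String Bool)
     let t_words := b.foldl (fun d word => d.insert word true) (PySem.Dict.empty : PySem.Dict String Bool)
     t_words.keys.foldl (fun acc word => if !(s_words.contains word) then acc ++ [word] else acc)
       (s_words.keys.foldl (fun acc word => if !(t_words.contains word) then acc ++ [word] else acc) []))
    = (a.foldl PySem.Set.add []).filter (fun w => !(PySem.Set.contains (b.foldl PySem.Set.add []) w))
      ++ (b.foldl PySem.Set.add []).filter (fun w => !(PySem.Set.contains (a.foldl PySem.Set.add []) w)) := by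
  simp only []
  set sA := a.foldl PySem.Set.add ([] : List String) with hsA
  set sB := b.foldl PySem.Set.add ([] : List String) with hsB
  have hkeysA : (a.foldl (fun d word => d.insert word true) (PySem.Dict.empty : PySem.Dict String Bool)).keys = sA := by
    rw [show (fun (d : PySem.Dict String Bool) (word : String) => d.insert word true)
          = (fun d word => d.insert word ((fun _ _ => true) d word)) from rfl,
        PySem.Dict.keys_foldl_insert a (fun _ _ => true) PySem.Dict.empty]
    simp only [PySem.Set.update, PySem.Dict.keys_empty]
    exact hsA.symm
  have hkeysB : (b.foldl (fun d word => d.insert word true) (PySem.Dict.empty : PySem.Dict String Bool)).keys = sB := by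
    rw [show (fun (d : PySem.Dict String Bool) (word : String) => d.insert word true)
          = (fun d word => d.insert word ((fun _ _ => true) d word)) from rfl,
        PySem.Dict.keys_foldl_insert b (fun _ _ => true) PySem.Dict.empty]
    simp only [PySem.Set.update, PySem.Dict.keys_empty]
    exact hsB.symm
  have hcontA : ∀ w, (a.foldl (fun d word => d.insert word true) (PySem.Dict.empty : PySem.Dict String Bool)).contains w = PySem.Set.contains sA w := by
    intro w
    rw [PySem.Dict.contains_eq_decide_mem_keys, hkeysA]
    simp [PySem.Set.contains]
  have hcontB : ∀ w, (b.foldl (fun d word => d.insert word true) (PySem.Dict.empty : PySem.Dict String Bool)).contains w = PySem.Set.contains sB w := by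
    intro w
    rw [PySem.Dict.contains_eq_decide_mem_keys, hkeysB]
    simp [PySem.Set.contains]
  rw [hkeysA, hkeysB]
  simp only [hcontA, hcontB]
  have hf1 := PySem.List.foldl_append_if (fun w => !(PySem.Set.contains sB w)) (fun w : String => w) sA []
  have hf2 := PySem.List.foldl_append_if (fun w => !(PySem.Set.contains sA w)) (fun w : String => w) sB
    (List.map (fun w : String => w) (List.filter (fun w => !(PySem.Set.contains sB w)) sA))
  simp only [List.nil_append] at hf1
  rw [hf1, hf2]
  simp [List.map_id']

-- unfolding of PySem.Set.add on membership cases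
theorem pvAddMem (u : List String) (x : String) (h : x ∈ u) : PySem.Set.add u x = u := by
  simp [PySem.Set.add, PySem.Set.contains, h]

theorem pvAddNotMem (u : List String) (x : String) (h : x ∉ u) : PySem.Set.add u x = u ++ [x] := by
  simp [PySem.Set.add, PySem.Set.contains, h]

theorem pvAddNodup (u : List String) (x : String) (h : u.Nodup) : (PySem.Set.add u x).Nodup := by
  by_cases hx : x ∈ u
  · rw [pvAddMem u x hx]; exact h
  · rw [pvAddNotMem u x hx]
    exact h.append (List.nodup_singleton x) (List.disjoint_singleton.mpr hx)

theorem pvContainsAdd (u : List String) (x w : String) (hne : w ≠ x) :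
    PySem.Set.contains (PySem.Set.add u x) w = PySem.Set.contains u w := by
  by_cases hx : x ∈ u
  · rw [pvAddMem u x hx]
  · rw [pvAddNotMem u x hx]
    simp [PySem.Set.contains, hne]

-- the first marking pass (mark[w] = 1) builds the ordered set of s's words, each tagged 1
theorem pvMark1 (a : List String) : ∀ (u : List String) (d : PySem.Dict String Int),
    u.Nodup → d.items = u.map (fun w => (w, (1 : Int))) →
    (a.foldl (fun d w => d.insert w 1) d).items
      = (a.foldl PySem.Set.add u).map (fun w => (w, (1 : Int))) := by
  induction a with
  | nil => intro u d _ hd; simpa using hd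
  | cons x rest ih =>
      intro u d hu hd
      simp only [List.foldl_cons]
      have hkeys : d.keys = u := by
        simp only [PySem.Dict.keys, hd, List.map_map]
        simp [Function.comp_def]
      have hcont : d.contains x = decide (x ∈ u) := by
        rw [PySem.Dict.contains_eq_decide_mem_keys, hkeys]
      by_cases hx : x ∈ u
      · have h1 : (d.insert x 1).items = d.items := by
          rw [PySem.Dict.items_insert_of_contains _ _ (by rw [hcont]; simpa using hx)]
          rw [hd, List.map_map]
          apply List.map_congr_left
          intro w _
          by_cases hw : w = x
          · subst hw; simp
          · simp [hw]
        rw [pvAddMem u x hx]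
        exact ih u (d.insert x 1) hu (h1.trans hd)
      · have h1 : (d.insert x 1).items = (u ++ [x]).map (fun w => (w, (1 : Int))) := by
          rw [PySem.Dict.items_insert_of_not_contains _ _ (by rw [hcont]; simpa using hx)]
          simp [hd]
        rw [pvAddNotMem u x hx]
        exact ih (u ++ [x]) (d.insert x 1) (hu.append (List.nodup_singleton x) (List.disjoint_singleton.mpr hx)) h1

-- invariant of the second marking pass: s-words carry 3 iff already seen in the processed
-- prefix of t (else 1), and the t-only words seen so far follow, tagged 2
theorem pvMark2 (sA : List String) (hsA : sA.Nodup) (b : List String) :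
    ∀ (u : List String) (d : PySem.Dict String Int), u.Nodup →
    d.items = sA.map (fun w => (w, if PySem.Set.contains u w then (3 : Int) else 1))
              ++ (u.filter (fun w => !(PySem.Set.contains sA w))).map (fun w => (w, (2 : Int))) →
    (b.foldl (fun d w => d.insert w (Int.lor (d.getD w 0) 2)) d).items
      = sA.map (fun w => (w, if PySem.Set.contains (b.foldl PySem.Set.add u) w then (3 : Int) else 1))
        ++ ((b.foldl PySem.Set.add u).filter (fun w => !(PySem.Set.contains sA w))).map (fun w => (w, (2 : Int))) := by
  induction b with
  | nil => intro u d _ hd; simpa using hd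
  | cons x rest ih =>
      intro u d hu hd
      simp only [List.foldl_cons]
      have hkeys : d.keys = sA ++ u.filter (fun w => !(PySem.Set.contains sA w)) := by
        simp only [PySem.Dict.keys, hd, List.map_append, List.map_map]
        simp [Function.comp_def]
      have hnk : d.keys.Nodup := by
        rw [hkeys]
        refine List.Nodup.append hsA (hu.filter _) ?_
        intro w hw hw2
        have := (List.mem_filter.mp hw2).2
        simp only [PySem.Set.contains, Bool.not_eq_true', List.contains_eq_mem,
          decide_eq_false_iff_not] at this
        exact this hw
      have hcont : d.contains x = decide (x ∈ sA ∨ (x ∈ u ∧ x ∉ sA)) := by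
        rw [PySem.Dict.contains_eq_decide_mem_keys, hkeys]
        simp only [List.mem_append, List.mem_filter, PySem.Set.contains, Bool.not_eq_true',
          List.contains_eq_mem, decide_eq_false_iff_not]
        try tauto
      by_cases hxa : x ∈ sA
      · -- x is an s-word: its tag becomes 3, position unchanged
        have hmem : (x, if PySem.Set.contains u x then (3 : Int) else 1) ∈ d.items := by
          rw [hd]; exact List.mem_append_left _ (List.mem_map.mpr ⟨x, hxa, rfl⟩)
        have hget : d.getD x 0 = if PySem.Set.contains u x then (3 : Int) else 1 :=
          PySem.Dict.getD_of_mem_items _ hmem hnk 0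
        have hval : Int.lor (d.getD x 0) 2 = 3 := by
          rw [hget]; split <;> decide
        have hitems : (d.insert x (Int.lor (d.getD x 0) 2)).items
            = sA.map (fun w => (w, if PySem.Set.contains (PySem.Set.add u x) w then (3 : Int) else 1))
              ++ ((PySem.Set.add u x).filter (fun w => !(PySem.Set.contains sA w))).map (fun w => (w, (2 : Int))) := by
          rw [hval, PySem.Dict.items_insert_of_contains _ _ (by rw [hcont]; simp [hxa]),
              hd, List.map_append, List.map_map, List.map_map]
          congr 1
          · apply List.map_congr_left
            intro w _
            by_cases hw : w = x
            · subst hw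
              by_cases hx : w ∈ u
              · simp [pvAddMem u w hx, PySem.Set.contains, Function.comp_def, hx]
              · simp [pvAddNotMem u w hx, PySem.Set.contains, Function.comp_def, hx]
            · have : PySem.Set.contains (PySem.Set.add u x) w = PySem.Set.contains u w :=
                pvContainsAdd u x w hw
              simp [Function.comp_def, hw, this]
          · have hfil : (PySem.Set.add u x).filter (fun w => !(PySem.Set.contains sA w))
                = u.filter (fun w => !(PySem.Set.contains sA w)) := by
              by_cases hx : x ∈ u
              · rw [pvAddMem u x hx]
              · rw [pvAddNotMem u x hx, List.filter_append]
                simp [PySem.Set.contains, hxa]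
            rw [hfil]
            apply List.map_congr_left
            intro w hw
            have : w ≠ x := by
              intro he; subst he
              have := (List.mem_filter.mp hw).2
              simp only [PySem.Set.contains, Bool.not_eq_true', List.contains_eq_mem,
                decide_eq_false_iff_not] at this
              exact this hxa
            simp [Function.comp_def, this]
        exact ih (PySem.Set.add u x) _ (pvAddNodup u x hu) hitems
      · by_cases hxu : x ∈ u
        · -- t-word already seen: tag stays 2, set unchanged
          have hmemf : x ∈ u.filter (fun w => !(PySem.Set.contains sA w)) := by
            simp [List.mem_filter, hxu, PySem.Set.contains, hxa]
          have hmem : (x, (2 : Int)) ∈ d.items := by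
            rw [hd]; exact List.mem_append_right _ (List.mem_map.mpr ⟨x, hmemf, rfl⟩)
          have hget : d.getD x 0 = 2 := PySem.Dict.getD_of_mem_items _ hmem hnk 0
          have hval : Int.lor (d.getD x 0) 2 = 2 := by rw [hget]; decide
          have hitems : (d.insert x (Int.lor (d.getD x 0) 2)).items = d.items := by
            rw [hval, PySem.Dict.items_insert_of_contains _ _ (by rw [hcont]; simp [hxu, hxa])]
            rw [hd, List.map_append, List.map_map, List.map_map]
            congr 1
            · apply List.map_congr_left
              intro w hw
              have : w ≠ x := fun he => hxa (he ▸ hw)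
              simp [Function.comp_def, this]
            · apply List.map_congr_left
              intro w _
              by_cases hw : w = x
              · subst hw; simp
              · simp [Function.comp_def, hw]
          simp only [pvAddMem u x hxu]
          exact ih u _ hu (hitems.trans hd)
        · -- new t-only word: appended with tag 2
          have hget : d.getD x 0 = 0 :=
            PySem.Dict.getD_of_not_contains _ 0 (by rw [hcont]; simp [hxa, hxu])
          have hval : Int.lor (d.getD x 0) 2 = 2 := by rw [hget]; decide
          have hitems : (d.insert x (Int.lor (d.getD x 0) 2)).items
              = sA.map (fun w => (w, if PySem.Set.contains (u ++ [x]) w then (3 : Int) else 1))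
                ++ ((u ++ [x]).filter (fun w => !(PySem.Set.contains sA w))).map (fun w => (w, (2 : Int))) := by
            rw [hval, PySem.Dict.items_insert_of_not_contains _ _ (by rw [hcont]; simp [hxa, hxu]), hd]
            have hfx : List.filter (fun w => !(PySem.Set.contains sA w)) [x] = [x] := by
              simp [PySem.Set.contains, hxa]
            rw [List.filter_append, hfx, List.map_append, List.append_assoc]
            congr 1
            apply List.map_congr_left
            intro w hw
            have hne : w ≠ x := fun he => hxa (he ▸ hw)
            simp [PySem.Set.contains, hne]
          simp only [pvAddNotMem u x hxu]
          exact ih (u ++ [x]) _ (hu.append (List.nodup_singleton x) (List.disjoint_singleton.mpr hxu)) hitems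

-- B computes the same two concatenated filters
theorem pvBSide (a b : List String) :
    (let mark : PySem.Dict String Int := a.foldl (fun d w => d.insert w 1) PySem.Dict.empty
     let mark2 : PySem.Dict String Int := b.foldl (fun d w => d.insert w (Int.lor (d.getD w 0) 2)) mark
     (mark2.items.filter (fun p => p.2 != 3)).map Prod.fst)
    = (a.foldl PySem.Set.add []).filter (fun w => !(PySem.Set.contains (b.foldl PySem.Set.add []) w))
      ++ (b.foldl PySem.Set.add []).filter (fun w => !(PySem.Set.contains (a.foldl PySem.Set.add []) w)) := by
  simp only []
  set sA := a.foldl PySem.Set.add ([] : List String) with hsA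
  set sB := b.foldl PySem.Set.add ([] : List String) with hsB
  have hnA : sA.Nodup := by
    rw [hsA, show a.foldl PySem.Set.add ([] : List String) = PySem.Set.ofList a from rfl]
    exact PySem.Set.nodup_ofList a
  have h1 : (a.foldl (fun d w => d.insert w (1 : Int)) PySem.Dict.empty).items
      = sA.map (fun w => (w, (1 : Int))) := pvMark1 a [] PySem.Dict.empty (by simp) rfl
  have h2 := pvMark2 sA hnA b [] (a.foldl (fun d w => d.insert w 1) PySem.Dict.empty) (by simp)
    (by rw [h1]; simp [PySem.Set.contains])
  rw [h2, List.filter_append, List.filter_map, List.filter_map, List.map_append, List.map_map, List.map_map]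
  congr 1
  · have : List.filter ((fun p : String × Int => p.2 != 3) ∘ fun w => (w, if PySem.Set.contains sB w then (3 : Int) else 1)) sA
        = List.filter (fun w => !(PySem.Set.contains sB w)) sA := by
      apply List.filter_congr
      intro w _
      by_cases hc : w ∈ sB
      · simp [Function.comp_def, hc]
      · simp [Function.comp_def, hc]
    rw [this]
    simp [Function.comp_def]
  · have : List.filter ((fun p : String × Int => p.2 != 3) ∘ fun w => (w, (2 : Int)))
        (List.filter (fun w => !(PySem.Set.contains sA w)) sB)
        = List.filter (fun w => !(PySem.Set.contains sA w)) sB :=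
      List.filter_eq_self.mpr (fun a _ => by change ((2 : Int) != 3) = true; decide)
    rw [this]
    simp [Function.comp_def]

-- ===== VERDICT (by name: the statement is the Claim_ definition above) =====
theorem get_uncommon_words_spec : Claim_equal_get_uncommon_words := by
  intro s t _
  unfold Spec_get_uncommon_words get_uncommon_words get_uncommon_words_alt
  rw [pvASide (pvSplitSpace s) (pvSplitSpace t), pvBSide (pvSplitSpace s) (pvSplitSpace t)]
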